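-- pv_equiv track=rewrite | github.com/andredcodebool/envcheck | envcheck/duplicates.py | find_intra_duplicates
-- ===== SOURCE A (Python) =====
-- from typing import Dict, List, Tuple
--
-- def find_intra_duplicates(lines: List[str]) -> Dict[str, int]:
--     """Return keys that appear more than once in a raw list of 'KEY=VALUE' lines."""
--     counts: Dict[str, int] = {}
--     for line in lines:
--         stripped = line.strip()
--         if not stripped or stripped.startswith("#"):
--             continue
--         if "=" not in stripped:
--             continue
--         key = stripped.split("=", 1)[0].strip()
--         counts[key] = counts.get(key, 0) + 1
--     return {k: v for k, v in counts.items() if v > 1}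
-- ===== SOURCE B (Python) =====
-- def _key_of(line):
--     s = line.strip()
--     if not s or s.startswith("#") or "=" not in s:
--         return None
--     return s.split("=", 1)[0].strip()
--
--
-- def find_intra_duplicates(lines):
--     keys = [k for k in map(_key_of, lines) if k is not None]
--     out = {}
--     while keys:
--         k = keys[0]
--         rest = [x for x in keys[1:] if x != k]
--         c = len(keys) - len(rest)
--         if c > 1:
--             out[k] = c
--         keys = rest
--     return out
-- ===== Notes on version B (the rewrite author's own statement) =====
-- stated objective: alternative
-- what changed: B replaces A's running-counts dict (built during the scan and filtered afterwards) by a partition-based grouping: it extracts the valid keys into a list, then repeatedly takes the first key, removes all of its occurrences from the remainder in one partition step, and reads the count off the length difference; no hash counter or per-key scan with count() is used.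
import Mathlib
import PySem

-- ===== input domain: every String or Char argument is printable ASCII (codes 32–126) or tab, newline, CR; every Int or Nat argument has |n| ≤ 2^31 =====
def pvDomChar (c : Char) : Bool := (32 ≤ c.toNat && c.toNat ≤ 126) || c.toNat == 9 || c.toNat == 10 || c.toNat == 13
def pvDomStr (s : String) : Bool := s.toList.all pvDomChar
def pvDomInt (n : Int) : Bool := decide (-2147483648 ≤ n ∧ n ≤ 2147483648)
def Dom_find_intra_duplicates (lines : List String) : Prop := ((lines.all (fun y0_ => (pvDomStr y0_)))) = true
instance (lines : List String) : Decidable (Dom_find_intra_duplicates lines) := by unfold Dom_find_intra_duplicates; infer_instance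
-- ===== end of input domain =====

-- B replaces the running-counts dict by partition-based grouping: take the first key,
-- strip its occurrences in one partition step, the count is the length difference (objective: alternative).

-- ===== PORT A =====
-- counts[key] = counts.get(key, 0) + 1 over the filtered lines, then keep entries with v > 1.
def find_intra_duplicates (lines : List String) : List (String × Int) :=
  let counts : PySem.Dict String Int :=
    lines.foldl (fun d line =>
      let stripped := PySem.Str.strip line
      if stripped == "" || PySem.Str.startswith stripped "#" then d
      else if !(PySem.Str.isIn "=" stripped) then d
      else
        -- split("=", 1) always returns a nonempty list, so [0] is its head
        let key := PySem.Str.strip (((PySem.Str.splitMax? stripped "=" 1).getD []).headD "")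
        d.insert key (d.getD key 0 + 1)) PySem.Dict.empty
  counts.items.filter (fun p => decide (1 < p.2))

-- ===== PORT B =====
def pvKeyOf (line : String) : Option String :=
  let s := PySem.Str.strip line
  if s == "" || PySem.Str.startswith s "#" || !(PySem.Str.isIn "=" s) then none
  else some (PySem.Str.strip (((PySem.Str.splitMax? s "=" 1).getD []).headD ""))

-- the while loop: k = keys[0]; rest drops every occurrence of k; c = how much the list shrank.
-- out[k] = c on a key never seen before appends to the dict, so out is kept as its items list.
def pvGroup : List String → List (String × Int) → List (String × Int)
  | [], out => out
  | k :: tl, out =>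
    let rest := tl.filter (fun x => x ≠ k)
    let c : Int := ((k :: tl).length : Int) - (rest.length : Int)
    pvGroup rest (if 1 < c then out ++ [(k, c)] else out)
  termination_by keys _ => keys.length
  decreasing_by
    simp only [List.length_unattach]
    exact Nat.lt_succ_of_le (le_trans (List.length_filter_le _ _) (by simp))

def find_intra_duplicates_alt (lines : List String) : List (String × Int) :=
  let keys := (lines.map pvKeyOf).filterMap id
  pvGroup keys []

-- ===== PRECONDITION & SPEC =====
def Spec_find_intra_duplicates (lines : List String) (out : List (String × Int)) : Prop := out = find_intra_duplicates_alt lines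
instance (lines : List String) (out : List (String × Int)) : Decidable (Spec_find_intra_duplicates lines out) := by unfold Spec_find_intra_duplicates; infer_instance

-- ===== CLAIM (what is proved, stated in full; the proofs are below) =====
def Claim_equal_find_intra_duplicates : Prop := ∀ (lines : List String), Dom_find_intra_duplicates lines → Spec_find_intra_duplicates lines (find_intra_duplicates lines)

-- ===== LEMMAS AND PROOFS =====

-- A's filtered fold over lines is the plain counting fold over the extracted key list.
theorem pv_fold_bridge (lines : List String) (d : PySem.Dict String Int) :
    lines.foldl (fun d line =>
      let stripped := PySem.Str.strip line
      if stripped == "" || PySem.Str.startswith stripped "#" then d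
      else if !(PySem.Str.isIn "=" stripped) then d
      else
        let key := PySem.Str.strip (((PySem.Str.splitMax? stripped "=" 1).getD []).headD "")
        d.insert key (d.getD key 0 + 1)) d
    = ((lines.map pvKeyOf).filterMap id).foldl (fun d k => d.insert k (d.getD k 0 + 1)) d := by
  induction lines generalizing d with
  | nil => rfl
  | cons line rest ih =>
    simp only [List.foldl_cons, List.map_cons, List.filterMap_cons]
    by_cases h1 : (PySem.Str.strip line == "" || PySem.Str.startswith (PySem.Str.strip line) "#") = true
    · have hk : pvKeyOf line = none := by
        simp only [pvKeyOf]; rw [if_pos (by rw [h1]; simp)]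
      rw [if_pos h1]
      simp only [hk, id]
      exact ih d
    · by_cases h2 : (!(PySem.Str.isIn "=" (PySem.Str.strip line))) = true
      · have hk : pvKeyOf line = none := by
          simp only [pvKeyOf]; rw [if_pos (by rw [h2]; simp)]
        rw [if_neg h1, if_pos h2]
        simp only [hk, id]
        exact ih d
      · simp only [Bool.not_eq_true] at h1 h2
        have hk : pvKeyOf line
            = some (PySem.Str.strip (((PySem.Str.splitMax? (PySem.Str.strip line) "=" 1).getD []).headD "")) := by
          simp only [pvKeyOf]; rw [if_neg (by rw [h1, h2]; simp)]
        rw [if_neg (by rw [h1]; simp), if_neg (by rw [h2]; simp)]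
        simp only [hk, id, List.foldl_cons]
        exact ih _

-- set/partition lemmas for the grouping loop
theorem pv_set_add_cons (k x : String) (s : List String) (h : x ≠ k) :
    PySem.Set.add (k :: s) x = k :: PySem.Set.add s x := by
  simp only [PySem.Set.add, PySem.Set.contains, List.contains_cons]
  rw [beq_eq_false_iff_ne.mpr h]
  simp only [Bool.false_or]
  split_ifs <;> simp

theorem pv_add_self_mem (x : String) (s : List String) (hs : x ∈ s) :
    PySem.Set.add s x = s := by
  simp [PySem.Set.add, PySem.Set.contains, hs]

theorem pv_mem_add (k x : String) (s : List String) (hs : k ∈ s) :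
    k ∈ PySem.Set.add s x := by
  simp only [PySem.Set.add, PySem.Set.contains]
  split_ifs <;> simp [hs]

theorem pv_foldl_add_mem (k : String) (l : List String) :
    ∀ s : List String, k ∈ s →
      l.foldl PySem.Set.add s = (l.filter (fun x => x ≠ k)).foldl PySem.Set.add s := by
  induction l with
  | nil => intro s _; rfl
  | cons x xs ih =>
    intro s hs
    by_cases hx : x = k
    · subst hx
      simp only [List.foldl_cons, List.filter_cons]
      rw [if_neg (by simp), pv_add_self_mem x s hs]
      exact ih s hs
    · simp only [List.foldl_cons, List.filter_cons]
      rw [if_pos (by simpa using hx)]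
      simp only [List.foldl_cons]
      exact ih _ (pv_mem_add k x s hs)

theorem pv_foldl_add_cons (k : String) (l : List String) :
    ∀ s : List String, k ∉ l →
      l.foldl PySem.Set.add (k :: s) = k :: l.foldl PySem.Set.add s := by
  induction l with
  | nil => intro s _; rfl
  | cons x xs ih =>
    intro s hl
    simp only [List.foldl_cons]
    rw [pv_set_add_cons k x s (by rintro rfl; exact hl (List.mem_cons_self))]
    exact ih _ (fun h => hl (List.mem_cons_of_mem _ h))

theorem pv_ofList_cons_filter (k : String) (tl : List String) :
    PySem.Set.ofList (k :: tl) = k :: PySem.Set.ofList (tl.filter (fun x => x ≠ k)) := by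
  rw [PySem.Set.ofList_eq_foldl, PySem.Set.ofList_eq_foldl]
  simp only [List.foldl_cons]
  have h0 : PySem.Set.add [] k = [k] := by simp [PySem.Set.add, PySem.Set.contains]
  rw [h0, pv_foldl_add_mem k tl [k] (by simp)]
  exact pv_foldl_add_cons k _ [] (by simp)

theorem pv_count_filter_ne (k k' : String) (tl : List String) (h : k' ≠ k) :
    (tl.filter (fun x => x ≠ k)).count k' = tl.count k' := by
  exact List.count_filter (by simp [h])

theorem pv_length_filter_count (k : String) (tl : List String) :
    tl.length = (tl.filter (fun x => x ≠ k)).length + tl.count k := by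
  induction tl with
  | nil => simp
  | cons x xs ih =>
    by_cases hx : x = k <;>
      simp [hx, ih] <;> omega

theorem pv_group_spec_aux : ∀ (n : Nat) (keys : List String), keys.length ≤ n → ∀ (out : List (String × Int)),
    pvGroup keys out
      = out ++ ((PySem.Set.ofList keys).map (fun k => (k, (keys.count k : Int)))).filter
          (fun p => decide (1 < p.2)) := by
  intro n
  induction n with
  | zero =>
    intro keys hk out
    have : keys = [] := List.eq_nil_of_length_eq_zero (Nat.le_zero.mp hk)
    subst this
    simp [pvGroup, PySem.Set.ofList]
  | succ n ih =>
    intro keys hk out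
    match keys with
    | [] => simp [pvGroup, PySem.Set.ofList]
    | k :: tl =>
      rw [pvGroup]
      have hF : (List.filter (fun x => decide (x ≠ k)) tl).length ≤ n := by
        have := List.length_filter_le (fun x => decide (x ≠ k)) tl
        simp at hk
        omega
      rw [ih _ hF]
      have hcv : ((k :: tl).length : Int) - ((List.filter (fun x => decide (x ≠ k)) tl).length : Int)
          = (((k :: tl).count k : Int)) := by
        have hl := pv_length_filter_count k tl
        simp only [List.count_cons_self, List.length_cons]
        push_cast
        omega
      rw [hcv]
      rw [pv_ofList_cons_filter k tl]
      have hmap : List.map (fun k1 => (k1, ((k :: tl).count k1 : Int)))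
            (PySem.Set.ofList (List.filter (fun x => decide (x ≠ k)) tl))
          = List.map (fun k1 => (k1, (((List.filter (fun x => decide (x ≠ k)) tl).count k1 : Nat) : Int)))
            (PySem.Set.ofList (List.filter (fun x => decide (x ≠ k)) tl)) := by
        apply List.map_congr_left
        intro k1 hk1
        have hmem : k1 ∈ List.filter (fun x => decide (x ≠ k)) tl := by
          rwa [PySem.Set.mem_ofList] at hk1
        have hne : k1 ≠ k := by simpa using List.of_mem_filter hmem
        rw [pv_count_filter_ne k k1 tl hne]
        simp [Ne.symm hne]
      simp only [List.map_cons, List.filter_cons, hmap]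
      by_cases h : (1 : Int) < ((k :: tl).count k : Int)
      · rw [if_pos h, if_pos (by simpa using h)]
        simp
      · rw [if_neg h, if_neg (by simpa using h)]

theorem pv_group_spec (keys : List String) (out : List (String × Int)) :
    pvGroup keys out
      = out ++ ((PySem.Set.ofList keys).map (fun k => (k, (keys.count k : Int)))).filter
          (fun p => decide (1 < p.2)) :=
  pv_group_spec_aux keys.length keys le_rfl out

-- ===== VERDICT (by name: the statement is the Claim_ definition above) =====
theorem find_intra_duplicates_spec : Claim_equal_find_intra_duplicates := by
  intro lines _
  show find_intra_duplicates lines = find_intra_duplicates_alt lines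
  simp only [find_intra_duplicates, find_intra_duplicates_alt]
  rw [pv_fold_bridge, PySem.Dict.foldl_insert_getD_add_one_eq_counter,
      PySem.Dict.items_counter, pv_group_spec]
  simp
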